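-- pv_equiv track=rewrite | github.com/microsoft/mu_plus | UefiTestingPkg/Library/DriverDependencyLogging/DispatchDataParser.py | IsGuid
-- ===== SOURCE A (Python) =====
-- def IsHex(Str):
--   if (len(Str) % 2) != 0:
--     return False
--   for c in Str:
--     if (c not in "0123456789ABCDEFabcdef"):
--       return False
--   return True
--
-- def IsGuid(Str):
--   GuidPartSizes = [ 8, 4, 4, 4, 12 ]
--   GuidParts = Str.split('-')
--
--   if len(GuidParts) != 5:
--     return False
--   for i in range(0, 5):
--     if not IsHex(GuidParts[i]):
--       return False
--     if len(GuidParts[i]) != GuidPartSizes[i]: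
--       return False
--   return True
-- ===== SOURCE B (Python) =====
-- HEX = "0123456789ABCDEFabcdef"
--
-- def _eat(s, n):
--     # consume exactly n hex digits; return the remainder, or None on failure
--     if len(s) < n or any(c not in HEX for c in s[:n]):
--         return None
--     return s[n:]
--
-- def IsGuid(Str):
--     s = _eat(Str, 8)
--     for n in (4, 4, 4, 12):
--         if s is None or not s.startswith('-'):
--             return False
--         s = _eat(s[1:], n)
--     return s == ''
-- ===== Notes on version B (the rewrite author's own statement) =====
-- stated objective: alternative
-- what changed: B validates the GUID by sequentially consuming fixed-size hex runs separated by dashes with a take/drop consumer (an eat helper returning the remainder string), instead of A's splitting on the dash into parts followed by an indexed loop checking each part's hex content and length.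
import Mathlib
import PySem

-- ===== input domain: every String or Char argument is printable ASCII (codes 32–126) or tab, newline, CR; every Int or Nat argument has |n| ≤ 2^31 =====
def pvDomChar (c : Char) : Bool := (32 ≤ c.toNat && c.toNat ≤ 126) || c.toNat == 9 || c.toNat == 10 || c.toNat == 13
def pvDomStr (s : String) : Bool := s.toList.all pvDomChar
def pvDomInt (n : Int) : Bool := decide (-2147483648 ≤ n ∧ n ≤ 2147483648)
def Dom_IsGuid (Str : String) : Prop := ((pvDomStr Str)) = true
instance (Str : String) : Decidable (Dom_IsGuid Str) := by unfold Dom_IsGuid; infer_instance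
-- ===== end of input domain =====

-- B re-validates the GUID by sequentially consuming fixed-size hex runs separated by dashes
-- (take/drop parser) instead of A's split-on-'-' plus indexed loop; alternative structure, same cost.

-- ===== PORT A =====
def pvHexDigits : List Char := "0123456789ABCDEFabcdef".toList


def pvIsHex (s : List Char) : Bool :=
  if s.length % 2 ≠ 0 then false
  else s.all (fun c => PySem.Chars.isIn [c] pvHexDigits)

def IsGuid (Str : String) : Bool :=
  let GuidPartSizes : List Int := [8, 4, 4, 4, 12]
  let GuidParts := PySem.Chars.splitOn Str.toList ['-']
  if GuidParts.length ≠ 5 then false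
  else (PySem.List.pyRange 0 5 1).all fun i =>
    pvIsHex (PySem.List.pyGetD GuidParts i []) &&
    ((PySem.List.pyGetD GuidParts i []).length : Int) == PySem.List.pyGetD GuidPartSizes i 0

-- ===== PORT B =====
def pvEat (s : List Char) (n : Int) : Option (List Char) :=
  if (s.length : Int) < n ∨ (PySem.Chars.slice s none (some n)).any (fun c => !(PySem.Chars.isIn [c] pvHexDigits)) then none
  else some (PySem.Chars.slice s (some n) none)

def pvGuidLoop : Option (List Char) → List Int → Bool
  | s, [] => s == some []
  | s, n :: ns =>
    match s with
    | none => false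
    | some t => if !(PySem.Chars.startswith t ['-']) then false
                else pvGuidLoop (pvEat (PySem.Chars.slice t (some 1) none) n) ns

def IsGuid_alt (Str : String) : Bool := pvGuidLoop (pvEat Str.toList 8) [4, 4, 4, 12]

-- ===== PRECONDITION & SPEC =====
def Spec_IsGuid (Str : String) (out : Bool) : Prop := out = IsGuid_alt Str
instance (Str : String) (out : Bool) : Decidable (Spec_IsGuid Str out) := by unfold Spec_IsGuid; infer_instance

-- ===== CLAIM (what is proved, stated in full; the proofs are below) =====
def Claim_equal_IsGuid : Prop := ∀ (Str : String), Dom_IsGuid Str → Spec_IsGuid Str (IsGuid Str)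

-- ===== LEMMAS AND PROOFS =====

def pvSd : List Char → List Char × List (List Char)
  | [] => ([], [])
  | c :: t => if c = '-' then ([], (pvSd t).1 :: (pvSd t).2) else (c :: (pvSd t).1, (pvSd t).2)

theorem pvGo_spec (l : List Char) : ∀ (fuel : Nat) (cur : List Char) (acc : List (List Char)),
    l.length ≤ fuel →
    PySem.Chars.splitOn.go ['-'] fuel l cur acc
      = acc.reverse ++ (cur.reverse ++ (pvSd l).1) :: (pvSd l).2 := by
  induction l with
  | nil =>
    intro fuel cur acc h
    cases fuel <;> simp [PySem.Chars.splitOn.go, pvSd]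
  | cons c t ih =>
    intro fuel cur acc h
    cases fuel with
    | zero => simp at h
    | succ f =>
      rw [PySem.Chars.splitOn.go]
      by_cases hc : c = '-'
      · subst hc
        rw [if_pos (by simp [List.isPrefixOf])]
        simp only [List.length_cons, List.length_nil, List.drop_succ_cons, List.drop_zero]
        rw [ih f [] (cur.reverse :: acc) (by simpa using h)]
        simp [pvSd]
      · rw [if_neg (by simp [List.isPrefixOf]; exact fun e => hc e.symm)]
        rw [ih f (c :: cur) acc (by simpa using h)]
        simp [pvSd, hc]

theorem pvSplitOn_eq (cs : List Char) :
    PySem.Chars.splitOn cs ['-'] = (pvSd cs).1 :: (pvSd cs).2 := by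
  have := pvGo_spec cs (cs.length + 1) [] [] (by omega)
  simpa [PySem.Chars.splitOn] using this

def pvHexc (c : Char) : Bool := PySem.Chars.isIn [c] pvHexDigits

theorem pvHexc_no_dash {p : List Char} (h : p.all pvHexc = true) : '-' ∉ p := by
  intro hm
  have := List.all_eq_true.mp h _ hm
  simp [pvHexc, PySem.Chars.isIn, pvHexDigits] at this
  revert this; decide

theorem pvSd_dash (r : List Char) : pvSd ('-' :: r) = ([], (pvSd r).1 :: (pvSd r).2) := by
  simp [pvSd]

theorem pvSd_append {p : List Char} (h : '-' ∉ p) (r : List Char) :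
    pvSd (p ++ r) = (p ++ (pvSd r).1, (pvSd r).2) := by
  induction p with
  | nil => simp
  | cons c t ih =>
    have hc : c ≠ '-' := fun e => h (e ▸ List.mem_cons_self)
    have ht : '-' ∉ t := fun m => h (List.mem_cons_of_mem _ m)
    simp [pvSd, hc, ih ht]

theorem pvSd_join (cs : List Char) :
    (pvSd cs).1 ++ ((pvSd cs).2.map (fun p => '-' :: p)).flatten = cs := by
  induction cs with
  | nil => simp [pvSd]
  | cons c t ih =>
    by_cases hc : c = '-'
    · subst hc; simp [pvSd, ih]
    · simp [pvSd, hc]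
      simpa using ih

theorem pvEat_eq (s : List Char) (n : Nat) :
    pvEat s (n : Int) = if n ≤ s.length ∧ (s.take n).all pvHexc = true then some (s.drop n) else none := by
  unfold pvEat
  rw [PySem.Chars.slice_eq_listSlice, PySem.Chars.slice_eq_listSlice,
      PySem.List.slice_to_natCast, PySem.List.slice_from_natCast]
  have hany : ((s.take n).any fun c => !PySem.Chars.isIn [c] pvHexDigits) = !((s.take n).all pvHexc) := by
    rw [← List.not_all_eq_any_not]
    rfl
  rw [hany]
  by_cases h : n ≤ s.length ∧ (s.take n).all pvHexc = true
  · rw [if_pos h, if_neg]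
    rintro (hl | hh)
    · have : s.length < n := by exact_mod_cast hl
      omega
    · simp [h.2] at hh
  · rw [if_neg h]
    rw [if_pos]
    rcases not_and_or.mp h with hl | hh
    · exact Or.inl (by exact_mod_cast Nat.lt_of_not_le hl)
    · exact Or.inr (by simp [Bool.not_eq_true] at hh ⊢; simp [hh])

theorem pvA_compute (Str : String) (p0 p1 p2 p3 p4 : List Char)
    (h : pvSd Str.toList = (p0, [p1, p2, p3, p4])) :
    IsGuid Str = ((pvIsHex p0 && (p0.length == 8)) && (pvIsHex p1 && (p1.length == 4)) &&
                  (pvIsHex p2 && (p2.length == 4)) && (pvIsHex p3 && (p3.length == 4)) &&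
                  (pvIsHex p4 && (p4.length == 12))) := by
  unfold IsGuid
  rw [pvSplitOn_eq, h]
  simp only []
  rw [if_neg (by simp)]
  rw [show PySem.List.pyRange 0 5 1 = [0,1,2,3,4] from by decide]
  simp [PySem.List.pyGetD, PySem.List.pyGet?, PySem.List.pyIdx?, Bool.and_assoc]
  have cb : ∀ (n : Nat) (m : Int) (k : Nat), m = (k:Int) → (((n:Int) == m) = (n == k)) := by
    intro n m k hm; subst hm; simp only [beq_eq_beq]; omega
  rw [cb _ 8 8 (by norm_num), cb _ 4 4 (by norm_num), cb _ 4 4 (by norm_num),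
      cb _ 4 4 (by norm_num), cb _ 12 12 (by norm_num)]

theorem pvA_false (Str : String) (h : (pvSd Str.toList).2.length ≠ 4) : IsGuid Str = false := by
  unfold IsGuid
  rw [pvSplitOn_eq]
  rw [if_pos (by simp [h])]

theorem pvEat_eq' (s : List Char) (n : Nat) (m : Int) (hm : m = (n : Int)) :
    pvEat s m = if n ≤ s.length ∧ (s.take n).all pvHexc = true then some (s.drop n) else none := by
  rw [hm, pvEat_eq]

theorem pvLoop_none (ns : List Int) : pvGuidLoop none ns = false := by
  cases ns <;> simp [pvGuidLoop]

theorem pvEat_some {p : List Char} (r : List Char) (n : Nat) (m : Int) (hm : m = (n : Int))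
    (hl : p.length = n) (hh : p.all pvHexc = true) :
    pvEat (p ++ r) m = some r := by
  rw [pvEat_eq' _ n m hm, if_pos]
  · rw [List.drop_left' hl]
  · constructor
    · rw [List.length_append, hl]; omega
    · rw [List.take_left' hl]; exact hh

theorem pvLoop_step (t : List Char) (n : Int) (ns : List Int) :
    pvGuidLoop (some ('-' :: t)) (n :: ns) = pvGuidLoop (pvEat t n) ns := by
  rw [pvGuidLoop]
  rw [if_neg]
  · rw [PySem.Chars.slice_eq_listSlice, PySem.List.slice_from_one, List.tail_cons]
  · simp [PySem.Chars.startswith]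

theorem pvB_of_shape (p0 p1 p2 p3 p4 : List Char)
    (h0 : p0.length = 8 ∧ p0.all pvHexc = true) (h1 : p1.length = 4 ∧ p1.all pvHexc = true)
    (h2 : p2.length = 4 ∧ p2.all pvHexc = true) (h3 : p3.length = 4 ∧ p3.all pvHexc = true)
    (h4 : p4.length = 12 ∧ p4.all pvHexc = true) :
    pvGuidLoop (pvEat (p0 ++ '-' :: (p1 ++ '-' :: (p2 ++ '-' :: (p3 ++ '-' :: p4)))) 8) [4,4,4,12] = true := by
  rw [pvEat_some _ 8 _ (by norm_num) h0.1 h0.2, pvLoop_step,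
      pvEat_some _ 4 _ (by norm_num) h1.1 h1.2, pvLoop_step,
      pvEat_some _ 4 _ (by norm_num) h2.1 h2.2, pvLoop_step,
      pvEat_some _ 4 _ (by norm_num) h3.1 h3.2, pvLoop_step]
  rw [show p4 = p4 ++ [] from (List.append_nil p4).symm,
      pvEat_some [] 12 _ (by norm_num) (by simpa using h4.1) (by simpa using h4.2)]
  rfl

theorem pvEat_inv {s : List Char} (n : Nat) {m : Int} (hm : m = (n : Int)) {ns : List Int}
    (h : pvGuidLoop (pvEat s m) ns = true) :
    n ≤ s.length ∧ (s.take n).all pvHexc = true ∧ pvGuidLoop (some (s.drop n)) ns = true := by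
  rw [pvEat_eq' s n m hm] at h
  split_ifs at h with hc
  · exact ⟨hc.1, hc.2, h⟩
  · rw [pvLoop_none] at h; cases h

theorem pvStep_inv {t : List Char} {n : Int} {ns : List Int}
    (h : pvGuidLoop (some t) (n :: ns) = true) :
    ∃ u, t = '-' :: u ∧ pvGuidLoop (pvEat u n) ns = true := by
  by_cases hs : PySem.Chars.startswith t ['-'] = true
  · obtain ⟨u, hu⟩ := (PySem.Chars.startswith_iff t ['-']).mp hs
    have ht : t = '-' :: u := by simpa using hu.symm
    exact ⟨u, ht, by rw [← pvLoop_step u n ns, ← ht]; exact h⟩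
  · rw [pvGuidLoop, if_pos (by simp [hs])] at h; cases h

theorem pvFinal_inv {t : List Char} (h : pvGuidLoop (some t) [] = true) : t = [] := by
  simpa [pvGuidLoop] using h

theorem pvB_inv (cs : List Char) (h : pvGuidLoop (pvEat cs 8) [4,4,4,12] = true) :
    ∃ p0 p1 p2 p3 p4 : List Char,
      cs = p0 ++ '-' :: (p1 ++ '-' :: (p2 ++ '-' :: (p3 ++ '-' :: p4))) ∧
      (p0.length = 8 ∧ p0.all pvHexc = true) ∧ (p1.length = 4 ∧ p1.all pvHexc = true) ∧
      (p2.length = 4 ∧ p2.all pvHexc = true) ∧ (p3.length = 4 ∧ p3.all pvHexc = true) ∧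
      (p4.length = 12 ∧ p4.all pvHexc = true) := by
  obtain ⟨hl0, hh0, h⟩ := pvEat_inv 8 (by norm_num) h
  obtain ⟨u1, hu1, h⟩ := pvStep_inv h
  obtain ⟨hl1, hh1, h⟩ := pvEat_inv 4 (by norm_num) h
  obtain ⟨u2, hu2, h⟩ := pvStep_inv h
  obtain ⟨hl2, hh2, h⟩ := pvEat_inv 4 (by norm_num) h
  obtain ⟨u3, hu3, h⟩ := pvStep_inv h
  obtain ⟨hl3, hh3, h⟩ := pvEat_inv 4 (by norm_num) h
  obtain ⟨u4, hu4, h⟩ := pvStep_inv h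
  obtain ⟨hl4, hh4, h⟩ := pvEat_inv 12 (by norm_num) h
  have hnil := pvFinal_inv h
  have hu4len : u4.length = 12 := by
    have := congrArg List.length hnil
    simp [List.length_drop] at this
    omega
  have htu4 : u4.take 12 = u4 := List.take_of_length_le (by omega)
  refine ⟨cs.take 8, u1.take 4, u2.take 4, u3.take 4, u4, ?_, ?_, ?_, ?_, ?_, ?_⟩
  · conv_lhs => rw [← List.take_append_drop 8 cs]
    rw [hu1]
    conv_lhs => rw [← List.take_append_drop 4 u1]
    rw [hu2]
    conv_lhs => rw [← List.take_append_drop 4 u2]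
    rw [hu3]
    conv_lhs => rw [← List.take_append_drop 4 u3]
    rw [hu4]
  · exact ⟨by simp [List.length_take]; omega, hh0⟩
  · exact ⟨by simp [List.length_take]; omega, hh1⟩
  · exact ⟨by simp [List.length_take]; omega, hh2⟩
  · exact ⟨by simp [List.length_take]; omega, hh3⟩
  · exact ⟨hu4len, by rw [← htu4]; exact hh4⟩

theorem pvSd_total {p : List Char} (h : '-' ∉ p) : pvSd p = (p, []) := by
  have := pvSd_append h []
  simpa [pvSd] using this

theorem pvMain (Str : String) : IsGuid Str = IsGuid_alt Str := by
  cases hb : IsGuid_alt Str with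
  | true =>
    unfold IsGuid_alt at hb
    obtain ⟨p0, p1, p2, p3, p4, hshape, h0, h1, h2, h3, h4⟩ := pvB_inv _ hb
    have hsd : pvSd Str.toList = (p0, [p1, p2, p3, p4]) := by
      rw [hshape, pvSd_append (pvHexc_no_dash h0.2), pvSd_dash,
          pvSd_append (pvHexc_no_dash h1.2), pvSd_dash,
          pvSd_append (pvHexc_no_dash h2.2), pvSd_dash,
          pvSd_append (pvHexc_no_dash h3.2), pvSd_dash,
          pvSd_total (pvHexc_no_dash h4.2)]
      simp
    rw [pvA_compute Str _ _ _ _ _ hsd]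
    have e0 : p0.all (fun c => PySem.Chars.isIn [c] pvHexDigits) = true := h0.2
    have e1 : p1.all (fun c => PySem.Chars.isIn [c] pvHexDigits) = true := h1.2
    have e2 : p2.all (fun c => PySem.Chars.isIn [c] pvHexDigits) = true := h2.2
    have e3 : p3.all (fun c => PySem.Chars.isIn [c] pvHexDigits) = true := h3.2
    have e4 : p4.all (fun c => PySem.Chars.isIn [c] pvHexDigits) = true := h4.2
    simp [pvIsHex, e0, e1, e2, e3, e4, h0.1, h1.1, h2.1, h3.1, h4.1]
  | false =>
    cases ha : IsGuid Str with
    | false => rfl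
    | true =>
      exfalso
      by_cases hlen : (pvSd Str.toList).2.length = 4
      case neg => rw [pvA_false Str hlen] at ha; cases ha
      rcases hps : (pvSd Str.toList).2 with _ | ⟨q1, _ | ⟨q2, _ | ⟨q3, _ | ⟨q4, _ | _⟩⟩⟩⟩ <;>
        (try (rw [hps] at hlen; simp at hlen))
      have hsd : pvSd Str.toList = ((pvSd Str.toList).1, [q1, q2, q3, q4]) := by
        rw [← hps]
      rw [pvA_compute Str _ _ _ _ _ hsd] at ha
      simp only [Bool.and_eq_true, beq_iff_eq] at ha
      obtain ⟨⟨⟨⟨x0, l0⟩, x1, l1⟩, x2, l2⟩, x3, l3⟩ := ha.1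
      obtain ⟨x4, l4⟩ := ha.2
      have hx : ∀ p : List Char, pvIsHex p = true → p.all pvHexc = true := by
        intro p hp
        unfold pvIsHex at hp
        split_ifs at hp
        exact hp
      have hshape := pvSd_join Str.toList
      rw [hsd] at hshape
      simp only [List.map_cons, List.map_nil, List.flatten_cons, List.flatten_nil,
        List.append_nil, List.cons_append] at hshape
      unfold IsGuid_alt at hb
      rw [← hshape] at hb
      rw [pvB_of_shape _ _ _ _ _ ⟨l0, hx _ x0⟩ ⟨l1, hx _ x1⟩ ⟨l2, hx _ x2⟩ ⟨l3, hx _ x3⟩ ⟨l4, hx _ x4⟩] at hb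
      cases hb

-- ===== VERDICT (by name: the statement is the Claim_ definition above) =====
theorem IsGuid_spec : Claim_equal_IsGuid := by
  intro Str _
  exact pvMain Str
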